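-- pv_equiv track=rewrite | github.com/RoyArkh/DATA_PRIVACY_AND_SECURTIY | HW1/fall24-skeleton.py | check_l_diversity
-- ===== SOURCE A (Python) =====
-- def check_l_diversity(dataset, l, sensitive_attr):
--     groups = {}
--     for record in dataset:
--         qi_values = tuple(record[attr] for attr in record.keys() if attr != sensitive_attr)
--         if qi_values not in groups:
--             groups[qi_values] = set()
--         groups[qi_values].add(record[sensitive_attr])
--
--     return all(len(distinct_values) >= l for distinct_values in groups.values())
-- ===== SOURCE B (Python) =====
-- def check_l_diversity(dataset, l, sensitive_attr):
--     pairs = [(tuple(v for a, v in record.items() if a != sensitive_attr),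
--               record[sensitive_attr])
--              for record in dataset]
--     return all(len({s2 for q2, s2 in pairs if q2 == q}) >= l for q, _ in pairs)
-- ===== Notes on version B (the rewrite author's own statement) =====
-- stated objective: alternative
-- what changed: Replaces the hash-grouping dict of sets with a flat list of (qi-tuple, sensitive) pairs checked per record by an inner filtered set-comprehension, so no grouping structure is built at all.
import Mathlib
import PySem

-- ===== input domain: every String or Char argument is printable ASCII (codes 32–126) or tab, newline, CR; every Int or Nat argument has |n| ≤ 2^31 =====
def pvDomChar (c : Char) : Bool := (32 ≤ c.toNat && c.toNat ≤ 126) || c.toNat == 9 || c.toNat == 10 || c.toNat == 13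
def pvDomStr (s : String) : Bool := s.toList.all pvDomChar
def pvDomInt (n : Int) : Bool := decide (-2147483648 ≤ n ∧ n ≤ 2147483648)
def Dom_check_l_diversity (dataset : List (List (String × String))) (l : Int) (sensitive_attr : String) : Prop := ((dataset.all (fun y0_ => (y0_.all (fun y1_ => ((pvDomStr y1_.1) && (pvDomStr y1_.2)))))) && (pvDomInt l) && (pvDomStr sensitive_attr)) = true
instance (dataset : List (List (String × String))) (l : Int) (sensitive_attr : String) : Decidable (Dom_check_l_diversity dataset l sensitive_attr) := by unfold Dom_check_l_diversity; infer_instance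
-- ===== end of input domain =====

-- B replaces A's hash-grouping dict of sets by a flat pair list checked per record
-- with an inner filtered set comprehension (alternative structure, not faster).
-- A record (a Python dict) is modelled as its insertion-order pair list; both ports
-- read it through PySem.Dict.ofList (duplicate keys: last value wins, Python dict(pairs)).

-- ===== PORT A =====
-- tuple(record[attr] for attr in record.keys() if attr != sensitive_attr)
def pvQi (record : List (String × String)) (sa : String) : List String :=
  (((PySem.Dict.ofList record).items.filter (fun p => p.1 ≠ sa)).map (·.2))

-- record[sensitive_attr]; total via getD, exact under Pre_ (key present)
def pvSens (record : List (String × String)) (sa : String) : String :=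
  (PySem.Dict.ofList record).getD sa ""

def check_l_diversity (dataset : List (List (String × String))) (l : Int) (sensitive_attr : String) : Bool :=
  let groups : PySem.Dict (List String) (PySem.Set String) :=
    dataset.foldl (fun g record =>
      let qi := pvQi record sensitive_attr
      let g := if g.contains qi then g else g.insert qi PySem.Set.empty
      g.modify qi PySem.Set.empty (fun s => PySem.Set.add s (pvSens record sensitive_attr)))
      PySem.Dict.empty
  groups.values.all (fun s => decide (l ≤ (s.length : Int)))

-- ===== PORT B =====
def check_l_diversity_alt (dataset : List (List (String × String))) (l : Int) (sensitive_attr : String) : Bool :=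
  let pairs := dataset.map (fun record => (pvQi record sensitive_attr, pvSens record sensitive_attr))
  pairs.all (fun p =>
    decide (l ≤ (((PySem.Set.ofList ((pairs.filter (fun p2 => p2.1 == p.1)).map (·.2))).length : Int))))

-- ===== PRECONDITION & SPEC =====
-- Pre_ excludes exactly the inputs where some record lacks sensitive_attr: there
-- Python A (and Python B) raise KeyError.
def Pre_check_l_diversity (dataset : List (List (String × String))) (l : Int) (sensitive_attr : String) : Prop :=
  ∀ r ∈ dataset, sensitive_attr ∈ r.map Prod.fst

instance (dataset : List (List (String × String))) (l : Int) (sensitive_attr : String) : Decidable (Pre_check_l_diversity dataset l sensitive_attr) := by unfold Pre_check_l_diversity; infer_instance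

def pvWitness_check_l_diversity : (List (List (String × String))) × Int × String :=
  ([[("age", "30"), ("disease", "flu")], [("age", "30"), ("disease", "cold")]], 2, "disease")

def Spec_check_l_diversity (dataset : List (List (String × String))) (l : Int) (sensitive_attr : String) (out : Bool) : Prop := out = check_l_diversity_alt dataset l sensitive_attr
instance (dataset : List (List (String × String))) (l : Int) (sensitive_attr : String) (out : Bool) : Decidable (Spec_check_l_diversity dataset l sensitive_attr out) := by unfold Spec_check_l_diversity; infer_instance

-- ===== CLAIM (what is proved, stated in full; the proofs are below) =====
def Claim_equal_check_l_diversity : Prop := ∀ (dataset : List (List (String × String))) (l : Int) (sensitive_attr : String), Dom_check_l_diversity dataset l sensitive_attr → Pre_check_l_diversity dataset l sensitive_attr → Spec_check_l_diversity dataset l sensitive_attr (check_l_diversity dataset l sensitive_attr)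

-- ===== LEMMAS AND PROOFS =====

-- A's loop body, named, and rewritten to a single insert.
def pvStep (sa : String) (g : PySem.Dict (List String) (PySem.Set String)) (record : List (String × String)) : PySem.Dict (List String) (PySem.Set String) :=
  let qi := pvQi record sa
  let g := if g.contains qi then g else g.insert qi PySem.Set.empty
  g.modify qi PySem.Set.empty (fun s => PySem.Set.add s (pvSens record sa))

lemma pvStep_eq_insert (sa : String) (g : PySem.Dict (List String) (PySem.Set String)) (r : List (String × String)) :
    pvStep sa g r = g.insert (pvQi r sa) (PySem.Set.add (g.getD (pvQi r sa) PySem.Set.empty) (pvSens r sa)) := by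
  unfold pvStep
  by_cases h : g.contains (pvQi r sa) = true
  · simp only [h, if_true]
    simp [PySem.Dict.modify, PySem.Dict.getD_eq_get?_getD]
  · simp only [Bool.not_eq_true] at h
    have h2 : g.get? (pvQi r sa) = none := by
      rw [PySem.Dict.get?_eq_none_iff_contains]; exact h
    simp only [h]
    simp [PySem.Dict.modify, PySem.Dict.getD_eq_get?_getD, PySem.Dict.insert_insert_self,
          PySem.Dict.get?_insert_self, h2, PySem.Set.add, PySem.Set.empty]

lemma pvGetD_foldl (sa : String) (l : List (List (String × String))) (g : PySem.Dict (List String) (PySem.Set String)) (q : List String) :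
    (l.foldl (pvStep sa) g).getD q PySem.Set.empty
      = PySem.Set.update (g.getD q PySem.Set.empty) ((l.filter (fun r => pvQi r sa == q)).map (fun r => pvSens r sa)) := by
  induction l generalizing g with
  | nil => simp [PySem.Set.update]
  | cons r rest ih =>
    rw [List.foldl_cons, ih, pvStep_eq_insert]
    by_cases h : pvQi r sa = q
    · subst h
      simp [PySem.Set.update]
    · rw [PySem.Dict.getD_insert]
      simp [h, Ne.symm h]

lemma pvKeys_foldl (sa : String) (l : List (List (String × String))) (g : PySem.Dict (List String) (PySem.Set String)) :
    (l.foldl (pvStep sa) g).keys = PySem.Set.update g.keys (l.map (fun r => pvQi r sa)) := by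
  induction l generalizing g with
  | nil => simp [PySem.Set.update]
  | cons r rest ih =>
    rw [List.foldl_cons, ih, pvStep_eq_insert, List.map_cons]
    by_cases h : g.contains (pvQi r sa) = true
    · rw [PySem.Dict.keys_insert_of_contains _ _ h]
      have : PySem.Set.add g.keys (pvQi r sa) = g.keys := by
        simp [PySem.Set.add, PySem.Set.contains, ← PySem.Dict.contains_iff_mem_keys, h]
      simp [PySem.Set.update, this]
    · simp only [Bool.not_eq_true] at h
      rw [PySem.Dict.keys_insert_of_not_contains _ _ h]
      have : PySem.Set.add g.keys (pvQi r sa) = g.keys ++ [pvQi r sa] := by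
        simp [PySem.Set.add, PySem.Set.contains, ← PySem.Dict.contains_iff_mem_keys, h]
      simp [PySem.Set.update, this]

lemma pvNodup_keys_foldl (sa : String) (l : List (List (String × String))) (g : PySem.Dict (List String) (PySem.Set String)) (h : g.keys.Nodup) :
    (l.foldl (pvStep sa) g).keys.Nodup := by
  induction l generalizing g with
  | nil => exact h
  | cons r rest ih =>
    rw [List.foldl_cons, pvStep_eq_insert]
    exact ih _ (PySem.Dict.nodup_keys_insert _ _ _ h)

-- ===== VERDICT (by name: the statement is the Claim_ definition above) =====
theorem check_l_diversity_spec : Claim_equal_check_l_diversity := by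
  intro ds l sa _ _
  unfold Spec_check_l_diversity check_l_diversity check_l_diversity_alt
  have hA : (ds.foldl (fun g record =>
      let qi := pvQi record sa
      let g := if g.contains qi then g else g.insert qi PySem.Set.empty
      g.modify qi PySem.Set.empty (fun s => PySem.Set.add s (pvSens record sa)))
      PySem.Dict.empty) = ds.foldl (pvStep sa) PySem.Dict.empty := rfl
  simp only [hA]
  have hG : ∀ q : List String, (ds.foldl (pvStep sa) PySem.Dict.empty).getD q PySem.Set.empty
      = PySem.Set.ofList ((ds.filter (fun r => pvQi r sa == q)).map (fun r => pvSens r sa)) := by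
    intro q
    rw [pvGetD_foldl, PySem.Dict.getD_empty, PySem.Set.ofList_eq_foldl]
    rfl
  have hnd := pvNodup_keys_foldl sa ds PySem.Dict.empty PySem.Dict.nodup_keys_empty
  rw [PySem.Dict.values_eq_map_keys _ hnd PySem.Set.empty, List.all_map, pvKeys_foldl]
  have hkeys : PySem.Set.update (PySem.Dict.empty : PySem.Dict (List String) (PySem.Set String)).keys
      (ds.map fun r => pvQi r sa) = PySem.Set.ofList (ds.map fun r => pvQi r sa) := by
    rw [PySem.Set.ofList_eq_foldl]; rfl
  rw [hkeys]
  simp only [Function.comp_def, hG, List.filter_map, List.map_map, List.all_map]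
  rw [Bool.eq_iff_iff, List.all_eq_true, List.all_eq_true]
  constructor
  · intro h r hr
    have hq : pvQi r sa ∈ PySem.Set.ofList (ds.map fun r => pvQi r sa) := by
      rw [PySem.Set.mem_ofList]; exact List.mem_map_of_mem hr
    simpa using h _ hq
  · intro h q hq
    rw [PySem.Set.mem_ofList, List.mem_map] at hq
    obtain ⟨r, hr, rfl⟩ := hq
    simpa using h _ hr
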